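-- pv_equiv track=rewrite | github.com/RealTigerCZ/euler | Solutions/problem 05.py | addMissing
-- ===== SOURCE A (Python) =====
-- def addMissing(l1, l2):
--     l = []
--     while len(l1) > 0 and len(l2) > 0:
--         element = l1.pop()
--         if element in l2:
--             l2.remove(element)
--         l.append(element)
--     return list(sorted(l + l1 + l2))
-- ===== SOURCE B (Python) =====
-- def addMissing(l1, l2):
--     need = {}
--     for v in l1:
--         need[v] = need.get(v, 0) + 1
--     out = list(l1)
--     for v in l2:
--         if need.get(v, 0) > 0:
--             need[v] = need[v] - 1
--         else:
--             out.append(v)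
--     return sorted(out)
-- ===== Notes on version B (the rewrite author's own statement) =====
-- stated objective: faster
-- what changed: Replaced A's quadratic pop/membership/remove loop with one counting-dict pass: count l1, then scan l2 once appending only elements whose count is exhausted, then sort.
import Mathlib
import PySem

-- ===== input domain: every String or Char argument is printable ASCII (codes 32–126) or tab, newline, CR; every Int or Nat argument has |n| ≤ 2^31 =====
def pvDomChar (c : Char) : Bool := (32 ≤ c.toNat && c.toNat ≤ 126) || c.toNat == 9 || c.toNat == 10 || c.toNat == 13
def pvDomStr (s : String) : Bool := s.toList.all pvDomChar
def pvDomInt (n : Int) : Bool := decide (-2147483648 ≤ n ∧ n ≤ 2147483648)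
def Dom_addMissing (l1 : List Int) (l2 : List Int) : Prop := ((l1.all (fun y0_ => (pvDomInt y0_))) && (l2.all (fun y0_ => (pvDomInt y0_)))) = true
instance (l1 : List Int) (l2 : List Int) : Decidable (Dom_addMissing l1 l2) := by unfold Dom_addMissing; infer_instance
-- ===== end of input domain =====

-- B replaces A's quadratic pop/remove loop by a counting-dict single pass over l2 (faster);
-- equivalence is about the RETURN value only: Python A empties/mutates its arguments, B does not.

-- ===== PORT A =====
-- the while loop: pop the last element of l1, cancel one match in l2, collect into l
def addMissingLoop (l : List Int) (l1 : List Int) (l2 : List Int) : List Int × List Int × List Int :=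
  if 0 < l1.length ∧ 0 < l2.length then
    match hp : PySem.List.pop? l1 (-1) with
    | some (element, l1') =>
      addMissingLoop (l ++ [element]) l1'
        (if l2.contains element then (PySem.List.remove? l2 element).getD l2 else l2)
    | none => (l, l1, l2)   -- unreachable: l1 is nonempty here
  else (l, l1, l2)
termination_by l1.length
decreasing_by
  have := PySem.List.length_of_pop?_eq_some l1 hp; simp at this; omega

def addMissing (l1 : List Int) (l2 : List Int) : List Int :=
  let t := addMissingLoop [] l1 l2
  PySem.List.sorted (t.1 ++ t.2.1 ++ t.2.2) (fun x => x) false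

-- ===== PORT B =====
-- 'for v in l2: if need.get(v,0) > 0: need[v] -= 1 else: out.append(v)'
def altStep (p : PySem.Dict Int Int × List Int) (v : Int) : PySem.Dict Int Int × List Int :=
  if p.1.getD v 0 > 0 then (p.1.insert v (p.1.getD v 0 - 1), p.2) else (p.1, p.2 ++ [v])

def addMissing_alt (l1 : List Int) (l2 : List Int) : List Int :=
  let need := l1.foldl (fun d v => d.insert v (d.getD v 0 + 1)) PySem.Dict.empty
  let res := l2.foldl altStep (need, l1)
  PySem.List.sorted res.2 (fun x => x) false

-- ===== PRECONDITION & SPEC =====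
def Spec_addMissing (l1 : List Int) (l2 : List Int) (out : List Int) : Prop := out = addMissing_alt l1 l2
instance (l1 : List Int) (l2 : List Int) (out : List Int) : Decidable (Spec_addMissing l1 l2 out) := by unfold Spec_addMissing; infer_instance

-- ===== CLAIM (what is proved, stated in full; the proofs are below) =====
def Claim_equal_addMissing : Prop := ∀ (l1 : List Int) (l2 : List Int), Dom_addMissing l1 l2 → Spec_addMissing l1 l2 (addMissing l1 l2)

-- ===== LEMMAS AND PROOFS =====

-- A's loop, counted: the three pieces together hold every l1 element once plus the
-- unmatched part of l2 (truncated subtraction of counts).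
lemma aLoop_count (l1 : List Int) : ∀ (l l2 : List Int) (v : Int),
    ((addMissingLoop l l1 l2).1 ++ (addMissingLoop l l1 l2).2.1 ++ (addMissingLoop l l1 l2).2.2).count v
      = l.count v + l1.count v + (l2.count v - l1.count v) := by
  induction l1 using List.reverseRecOn with
  | nil =>
    intro l l2 v
    rw [addMissingLoop]
    simp [List.count_append]
  | append_singleton ys y ih =>
    intro l l2 v
    by_cases h2 : l2 = []
    · rw [addMissingLoop, if_neg (by simp [h2])]
      simp [h2, List.count_append]
    · have hcond : 0 < (ys ++ [y]).length ∧ 0 < l2.length := by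
        constructor <;> simp [List.length_pos_iff, h2]
      rw [addMissingLoop, if_pos hcond]
      split
      case h_2 hp =>
        rw [PySem.List.pop?_last] at hp; simp at hp
      case h_1 element l1' hp =>
        rw [PySem.List.pop?_last] at hp
        injection hp with hp'; injection hp' with he hl
        subst he; subst hl
        rw [ih]
        by_cases hm : y ∈ l2
        · have hrm : (if l2.contains y then (PySem.List.remove? l2 y).getD l2 else l2)
              = l2.erase y := by
            simp [hm, PySem.List.remove?_eq_some_erase l2 y hm]
          rw [hrm]
          have hcnt := List.count_erase (a := v) (b := y) (l := l2)
          have hone : 1 ≤ l2.count y := List.one_le_count_iff.mpr hm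
          by_cases hv : y = v
          · subst hv
            simp only [beq_self_eq_true, if_true] at hcnt
            simp [List.count_append, hcnt]
            omega
          · simp only [beq_iff_eq] at hcnt
            rw [if_neg hv] at hcnt
            simp [List.count_append, hv]
            omega
        · have hrm : (if l2.contains y then (PySem.List.remove? l2 y).getD l2 else l2) = l2 := by
            simp [hm]
          rw [hrm]
          have hz : l2.count y = 0 := List.count_eq_zero.mpr hm
          by_cases hv : y = v
          · subst hv; simp [List.count_append, hz]; omega
          · simp [List.count_append, hv]

-- B's l2-pass, counted: appended elements are those exceeding the remaining dict count.
lemma bLoop_count (l2 : List Int) (d : PySem.Dict Int Int) (out : List Int) (v : Int) :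
    (l2.foldl altStep (d, out)).2.count v
      = out.count v + (l2.count v - (d.getD v 0).toNat) := by
  induction l2 generalizing d out with
  | nil => simp
  | cons x rest ih =>
    by_cases hc : d.getD x 0 > 0
    · simp only [List.foldl_cons, altStep, hc, if_true]
      rw [ih]
      rw [PySem.Dict.getD_insert]
      by_cases hv : v = x
      · subst hv; simp; omega
      · simp [hv, Ne.symm hv]
    · simp only [List.foldl_cons, altStep, hc, if_false]
      rw [ih]
      have hc' : d.getD x 0 ≤ 0 := by omega
      by_cases hv : v = x
      · subst hv; simp [List.count_append]; omega
      · simp [List.count_append, Ne.symm hv]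

-- ===== VERDICT (by name: the statement is the Claim_ definition above) =====
theorem addMissing_spec : Claim_equal_addMissing := by
  intro l1 l2 _
  unfold Spec_addMissing addMissing addMissing_alt
  apply PySem.List.sorted_eq_sorted_of_perm _ _ _ (fun a b h => h)
  rw [List.perm_iff_count]
  intro v
  rw [aLoop_count, bLoop_count]
  simp [PySem.Dict.getD_foldl_insert_add_one, PySem.Dict.getD_empty, List.count_nil]
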